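-- pv_equiv track=rewrite | github.com/claduva/pdlonline | pokemon/management/commands/import_pokemons.py | calculate_type_effectiveness
-- ===== SOURCE A (Python) =====
-- def calculate_type_effectiveness(poke_types, typechart):
--     alltypes = ['Bug', 'Dark', 'Dragon', 'Electric', 'Fairy', 'Fighting', 'Fire', 'Flying',
--         'Ghost', 'Grass', 'Ground', 'Ice', 'Normal', 'Poison', 'Psychic', 'Rock', 'Steel', 'Water']
--
--     type_effectiveness = {t: 0 for t in alltypes}
--
--     for poke_type in poke_types:
--         for attacker, value in typechart[poke_type.lower()]['damageTaken'].items():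
--             if attacker in alltypes:
--                 if type_effectiveness[attacker] == 3:
--                     continue
--                 if value == 1: # Super Effective
--                     type_effectiveness[attacker] += -1
--                 if value == 2: # Not Very Effective
--                     type_effectiveness[attacker] += 1
--                 if value == 3: # Immune
--                     type_effectiveness[attacker] = 3
--
--     return type_effectiveness
-- ===== SOURCE B (Python) =====
-- def calculate_type_effectiveness(poke_types, typechart):
--     alltypes = ['Bug', 'Dark', 'Dragon', 'Electric', 'Fairy', 'Fighting', 'Fire', 'Flying',
--         'Ghost', 'Grass', 'Ground', 'Ice', 'Normal', 'Poison', 'Psychic', 'Rock', 'Steel', 'Water']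
--
--     damage_maps = [typechart[pt.lower()]['damageTaken'] for pt in poke_types]
--
--     result = {}
--     for target in alltypes:
--         score = 0
--         for dmg in damage_maps:
--             value = dmg.get(target)
--             if value is None or score == 3:
--                 continue
--             if value == 1:
--                 score -= 1
--             elif value == 2:
--                 score += 1
--             elif value == 3:
--                 score = 3
--         result[target] = score
--     return result
-- ===== Notes on version B (the rewrite author's own statement) =====
-- stated objective: alternative
-- what changed: B transposes the loop nest: instead of mutating a shared 18-key score dict while scanning each poke_type's whole damageTaken table, it computes each of the 18 target scores independently by folding over the poke_types' damage maps with a single dict lookup (dmg.get(target)) per step, preserving the lower()/KeyError behaviour and the freeze-at-3-before-value ordering.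
import Mathlib
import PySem

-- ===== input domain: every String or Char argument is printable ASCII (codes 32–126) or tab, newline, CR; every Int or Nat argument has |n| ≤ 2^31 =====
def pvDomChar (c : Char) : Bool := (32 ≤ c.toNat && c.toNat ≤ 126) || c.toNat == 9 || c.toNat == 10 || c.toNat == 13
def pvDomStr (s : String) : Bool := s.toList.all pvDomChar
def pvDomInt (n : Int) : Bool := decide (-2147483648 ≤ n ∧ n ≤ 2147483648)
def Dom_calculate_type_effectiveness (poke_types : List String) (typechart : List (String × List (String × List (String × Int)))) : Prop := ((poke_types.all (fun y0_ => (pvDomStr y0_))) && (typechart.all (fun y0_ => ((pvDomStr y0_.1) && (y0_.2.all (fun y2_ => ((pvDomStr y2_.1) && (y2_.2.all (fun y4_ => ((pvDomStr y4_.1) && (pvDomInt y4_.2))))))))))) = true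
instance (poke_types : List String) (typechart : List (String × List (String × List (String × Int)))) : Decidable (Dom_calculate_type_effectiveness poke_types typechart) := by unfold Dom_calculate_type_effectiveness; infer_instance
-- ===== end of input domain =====

-- B transposes A's loops: instead of mutating one shared score dict while scanning each type's
-- damageTaken, it computes each of the 18 target scores independently by a fold over poke_types
-- with a single dict lookup per step (objective: alternative decomposition, same cost).

-- ===== PORT A =====
-- the literal list both Pythons write
def pvAllTypes : List String := ["Bug", "Dark", "Dragon", "Electric", "Fairy", "Fighting", "Fire", "Flying",
  "Ghost", "Grass", "Ground", "Ice", "Normal", "Poison", "Psychic", "Rock", "Steel", "Water"]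

-- typechart[pt.lower()]['damageTaken'] as the Python dict it is; the KeyError cases (missing key,
-- where getD's [] default is reached) are excluded by Pre_.
def pvDmg (typechart : List (String × List (String × List (String × Int)))) (pt : String) : PySem.Dict String Int :=
  PySem.Dict.ofList ((PySem.Dict.ofList ((PySem.Dict.ofList typechart).getD (PySem.Str.lower pt) [])).getD "damageTaken" [])

-- A's inner loop body: one (attacker, value) item; the dict accesses type_effectiveness[attacker]
-- are ported as getD _ 0 (the key is always present: the dict holds exactly alltypes).
def pvABody (te : PySem.Dict String Int) (p : String × Int) : PySem.Dict String Int :=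
  if pvAllTypes.contains p.1 then
    if te.getD p.1 0 = 3 then te
    else
      let te1 := if p.2 = 1 then te.insert p.1 (te.getD p.1 0 + (-1)) else te
      let te2 := if p.2 = 2 then te1.insert p.1 (te1.getD p.1 0 + 1) else te1
      if p.2 = 3 then te2.insert p.1 3 else te2
  else te

def calculate_type_effectiveness (poke_types : List String) (typechart : List (String × List (String × List (String × Int)))) : List (String × Int) :=
  let te0 := pvAllTypes.foldl (fun d t => d.insert t 0) PySem.Dict.empty
  (poke_types.foldl (fun te pt => (pvDmg typechart pt).items.foldl pvABody te) te0).items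

-- ===== PORT B =====
-- B's inner step: value = dmg.get(target); skip on None or frozen score, else apply the chain
def pvBBody (target : String) (score : Int) (dmg : PySem.Dict String Int) : Int :=
  match dmg.get? target with
  | none => score
  | some value =>
    if score = 3 then score
    else if value = 1 then score - 1
    else if value = 2 then score + 1
    else if value = 3 then 3
    else score

def calculate_type_effectiveness_alt (poke_types : List String) (typechart : List (String × List (String × List (String × Int)))) : List (String × Int) :=
  let damage_maps := poke_types.map (fun pt => pvDmg typechart pt)
  pvAllTypes.map (fun target => (target, damage_maps.foldl (pvBBody target) 0))

-- ===== PRECONDITION & SPEC =====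
-- Pre_ excludes exactly the inputs where Python A raises KeyError: some poke_type whose lowercased
-- name is not a typechart key, or whose entry has no 'damageTaken' key.
def Pre_calculate_type_effectiveness (poke_types : List String) (typechart : List (String × List (String × List (String × Int)))) : Prop :=
  ∀ pt ∈ poke_types, (PySem.Dict.ofList typechart).contains (PySem.Str.lower pt) = true ∧
    (PySem.Dict.ofList ((PySem.Dict.ofList typechart).getD (PySem.Str.lower pt) [])).contains "damageTaken" = true
instance (poke_types : List String) (typechart : List (String × List (String × List (String × Int)))) : Decidable (Pre_calculate_type_effectiveness poke_types typechart) := by unfold Pre_calculate_type_effectiveness; infer_instance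

def pvWitness_calculate_type_effectiveness : List String × (List (String × List (String × List (String × Int)))) :=
  (["Fire"], [("fire", [("damageTaken", [("Water", 1), ("Grass", 2), ("Fire", 3)])])])

def Spec_calculate_type_effectiveness (poke_types : List String) (typechart : List (String × List (String × List (String × Int)))) (out : List (String × Int)) : Prop := out = calculate_type_effectiveness_alt poke_types typechart
instance (poke_types : List String) (typechart : List (String × List (String × List (String × Int)))) (out : List (String × Int)) : Decidable (Spec_calculate_type_effectiveness poke_types typechart out) := by unfold Spec_calculate_type_effectiveness; infer_instance

-- ===== CLAIM (what is proved, stated in full; the proofs are below) =====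
def Claim_equal_calculate_type_effectiveness : Prop := ∀ (poke_types : List String) (typechart : List (String × List (String × List (String × Int)))), Dom_calculate_type_effectiveness poke_types typechart → Pre_calculate_type_effectiveness poke_types typechart → Spec_calculate_type_effectiveness poke_types typechart (calculate_type_effectiveness poke_types typechart)

-- ===== LEMMAS AND PROOFS =====

-- the common per-target transition: what one present damageTaken value does to a score
def pvStep (v s : Int) : Int :=
  if s = 3 then s else if v = 1 then s - 1 else if v = 2 then s + 1 else if v = 3 then 3 else s

-- the dict A carries, parametrised by the score function on the 18 fixed keys
def pvDmap (g : String → Int) : PySem.Dict String Int := PySem.Dict.mk (pvAllTypes.map (fun t => (t, g t)))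

-- A's inner body seen from one target t
def pvF (t : String) (s : Int) (p : String × Int) : Int :=
  if pvAllTypes.contains p.1 && p.1 == t then pvStep p.2 s else s

lemma pvDmap_keys (g : String → Int) : (pvDmap g).keys = pvAllTypes := by
  simp [pvDmap, PySem.Dict.keys, Function.comp_def]

lemma pvAllTypes_nodup : pvAllTypes.Nodup := by decide

lemma pvDmap_congr (g₁ g₂ : String → Int) (h : ∀ t ∈ pvAllTypes, g₁ t = g₂ t) : pvDmap g₁ = pvDmap g₂ := by
  apply PySem.Dict.ext
  simpa [pvDmap] using List.map_congr_left (fun t ht => by rw [h t ht])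

lemma pvDmap_items_mem (g : String → Int) (t : String) (h : t ∈ pvAllTypes) : (t, g t) ∈ (pvDmap g).items := by
  simpa [pvDmap] using List.mem_map_of_mem (f := fun t => (t, g t)) h

lemma pvDmap_getD (g : String → Int) (t : String) (h : t ∈ pvAllTypes) : (pvDmap g).getD t 0 = g t :=
  PySem.Dict.getD_of_mem_items _ (pvDmap_items_mem g t h) (pvDmap_keys g ▸ pvAllTypes_nodup) 0

lemma pvDmap_insert (g : String → Int) (t : String) (v : Int) (h : t ∈ pvAllTypes) :
    (pvDmap g).insert t v = pvDmap (fun t' => if t' = t then v else g t') := by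
  apply PySem.Dict.ext
  rw [PySem.Dict.items_insert_of_contains _ v ((PySem.Dict.contains_iff_mem_keys _ t).mpr (pvDmap_keys g ▸ h))]
  simp only [pvDmap, List.map_map]
  refine List.map_congr_left (fun t' _ => ?_)
  by_cases ht' : t' = t <;> simp [ht']

theorem pvABody_dmap (g : String → Int) (p : String × Int) :
    pvABody (pvDmap g) p = pvDmap (fun t => pvF t (g t) p) := by
  by_cases hc : pvAllTypes.contains p.1
  · have hmem : p.1 ∈ pvAllTypes := by simpa using hc
    by_cases h3 : g p.1 = 3
    · have e : pvABody (pvDmap g) p = pvDmap g := by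
        rw [pvABody]; simp [pvDmap_getD g p.1 hmem, h3]
      rw [e]
      refine pvDmap_congr _ _ (fun t ht => ?_)
      by_cases hpt : t = p.1
      · subst hpt; simp [pvF, hmem, pvStep, h3]
      · simp [pvF, Ne.symm hpt]
    · by_cases h1 : p.2 = 1
      · have e : pvABody (pvDmap g) p = (pvDmap g).insert p.1 (g p.1 + -1) := by
          rw [pvABody]
          simp only [hc, if_true, pvDmap_getD g p.1 hmem, if_neg h3, h1]
          norm_num
        rw [e, pvDmap_insert g p.1 _ hmem]
        refine pvDmap_congr _ _ (fun t ht => ?_)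
        by_cases hpt : t = p.1
        · subst hpt; simp [pvF, hmem, pvStep, h3, h1]; omega
        · simp [pvF, Ne.symm hpt, hpt]
      · by_cases h2 : p.2 = 2
        · have e : pvABody (pvDmap g) p = (pvDmap g).insert p.1 (g p.1 + 1) := by
            rw [pvABody]
            simp only [hc, if_true, pvDmap_getD g p.1 hmem, if_neg h3, h2]
            norm_num [pvDmap_getD g p.1 hmem]
          rw [e, pvDmap_insert g p.1 _ hmem]
          refine pvDmap_congr _ _ (fun t ht => ?_)
          by_cases hpt : t = p.1
          · subst hpt; simp [pvF, hmem, pvStep, h3, h2]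
          · simp [pvF, Ne.symm hpt, hpt]
        · by_cases hv3 : p.2 = 3
          · have e : pvABody (pvDmap g) p = (pvDmap g).insert p.1 3 := by
              rw [pvABody]
              simp only [hc, if_true, pvDmap_getD g p.1 hmem, if_neg h3, hv3]
              norm_num
            rw [e, pvDmap_insert g p.1 _ hmem]
            refine pvDmap_congr _ _ (fun t ht => ?_)
            by_cases hpt : t = p.1
            · subst hpt; simp [pvF, hmem, pvStep, h3, hv3]
            · simp [pvF, Ne.symm hpt, hpt]
          · have e : pvABody (pvDmap g) p = pvDmap g := by
              rw [pvABody]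
              simp only [hc, if_true, pvDmap_getD g p.1 hmem, if_neg h3, if_neg h1, if_neg h2, if_neg hv3]
            rw [e]
            refine pvDmap_congr _ _ (fun t ht => ?_)
            by_cases hpt : t = p.1
            · subst hpt; simp [pvF, hmem, pvStep, h3, h1, h2, hv3]
            · simp [pvF, Ne.symm hpt]
  · have hnm : p.1 ∉ pvAllTypes := by simpa using hc
    rw [pvABody]
    simp only [hc, Bool.false_eq_true, if_false]
    refine pvDmap_congr _ _ (fun t ht => ?_)
    simp [pvF, hnm]

theorem pv_inner_fold (L : List (String × Int)) (g : String → Int) :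
    L.foldl pvABody (pvDmap g) = pvDmap (fun t => L.foldl (pvF t) (g t)) := by
  induction L generalizing g with
  | nil => simp
  | cons p L ih =>
    simp only [List.foldl_cons]
    rw [pvABody_dmap g p, ih]

theorem pv_outer_fold (pts : List String) (tc : List (String × List (String × List (String × Int)))) (g : String → Int) :
    pts.foldl (fun te pt => (pvDmg tc pt).items.foldl pvABody te) (pvDmap g)
      = pvDmap (fun t => pts.foldl (fun s pt => (pvDmg tc pt).items.foldl (pvF t) s) (g t)) := by
  induction pts generalizing g with
  | nil => simp
  | cons pt pts ih =>
    simp only [List.foldl_cons]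
    rw [pv_inner_fold, ih]

lemma pv_te0 : pvAllTypes.foldl (fun d t => d.insert t 0) PySem.Dict.empty = pvDmap (fun _ => 0) := by decide

lemma pv_fold_f_not_mem (t : String) (L : List (String × Int)) (h : t ∉ L.map Prod.fst) (s : Int) :
    L.foldl (pvF t) s = s := by
  rw [PySem.List.foldl_congr_mem L (pvF t) (fun acc _ => acc) s, PySem.List.foldl_ignore]
  intro acc p hp
  have hne : p.1 ≠ t := fun he => h (he ▸ List.mem_map_of_mem hp)
  simp [pvF, hne]

lemma pv_fold_f_of_mem (t : String) (v : Int) (L : List (String × Int))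
    (hnd : (L.map Prod.fst).Nodup) (hm : (t, v) ∈ L) (ht : pvAllTypes.contains t = true) (s : Int) :
    L.foldl (pvF t) s = pvStep v s := by
  induction L generalizing s with
  | nil => cases hm
  | cons p L ih =>
    simp only [List.map_cons, List.nodup_cons] at hnd
    rcases List.mem_cons.mp hm with he | hmL
    · subst he
      simp only [List.foldl_cons, pvF, ht, BEq.refl, Bool.and_self, if_true]
      exact pv_fold_f_not_mem t L hnd.1 _
    · have hne : p.1 ≠ t := fun he => hnd.1 (he ▸ List.mem_map_of_mem hmL)
      simp only [List.foldl_cons]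
      rw [show pvF t s p = s by simp [pvF, hne]]
      exact ih hnd.2 hmL _

lemma pv_fold_f_eq_b (t : String) (d : PySem.Dict String Int) (ht : pvAllTypes.contains t = true)
    (hnd : d.keys.Nodup) (s : Int) :
    d.items.foldl (pvF t) s = pvBBody t s d := by
  cases hq : d.get? t with
  | none =>
    have hnk : t ∉ d.keys := (PySem.Dict.get?_eq_none_iff_not_mem_keys d t).mp hq
    rw [pvBBody, hq]
    exact pv_fold_f_not_mem t d.items (by simpa [PySem.Dict.keys] using hnk) s
  | some v =>
    have hm : (t, v) ∈ d.items := PySem.Dict.mem_items_of_get?_eq_some d hq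
    have e : pvBBody t s d = pvStep v s := by rw [pvBBody, hq, pvStep]
    rw [e]
    exact pv_fold_f_of_mem t v d.items (by simpa [PySem.Dict.keys] using hnd) hm ht s

-- ===== VERDICT (by name: the statement is the Claim_ definition above) =====
theorem calculate_type_effectiveness_spec : Claim_equal_calculate_type_effectiveness := by
  intro poke_types typechart _ _
  unfold Spec_calculate_type_effectiveness
  unfold calculate_type_effectiveness calculate_type_effectiveness_alt
  simp only [pv_te0]
  rw [pv_outer_fold]
  simp only [pvDmap, List.foldl_map]
  refine List.map_congr_left (fun t ht => ?_)
  have htc : pvAllTypes.contains t = true := by simpa using ht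
  congr 1
  refine PySem.List.foldl_congr_mem _ _ _ _ (fun s pt _ => ?_)
  exact pv_fold_f_eq_b t (pvDmg typechart pt) htc (PySem.Dict.nodup_keys_ofList _) s
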